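-- pv_equiv track=rewrite | github.com/sofyagdk/euplotes | prepare_data/3_find_frameshifts/graphmaker.py | create_frame_list
-- ===== SOURCE A (Python) =====
-- def create_frame_list(seq): #and we need the first and the last. AND we dont need to differ them by frame
-- 	stops = ['TAA', 'TAG']
-- 	Frs = list()
--
-- 	i = 0
-- 	for j in range(0, len(seq), 3):
-- 		if (seq[j:j+3] in stops) or (j  >= len(seq) - 3):
-- 			fr = [i, j]
-- 			i = j + 3
-- 			Frs.append(fr)
--
-- 	i = 1
-- 	for j in range(1, len(seq), 3):
-- 		if (seq[j:j+3] in stops) or (j  >= len(seq) - 3):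
-- 			fr = [i, j]
-- 			i = j + 3
-- 			Frs.append(fr)
--
-- 	i = 2
-- 	for j in range(2, len(seq), 3):
-- 		if (seq[j:j+3] in stops) or (j  >= len(seq) - 3):
-- 			fr = [i, j]
-- 			i = j + 3
-- 			Frs.append(fr)
--
-- 	return Frs
-- ===== SOURCE B (Python) =====
-- def create_frame_list(seq):
--     stops = ('TAA', 'TAG')
--     n = len(seq)
--     cuts = [j for j in range(n) if seq[j:j+3] in stops or j >= n - 3]
--     out = []
--     for f in (0, 1, 2):
--         cf = [j for j in cuts if j % 3 == f]
--         out += [[s, j] for s, j in zip([f] + [c + 3 for c in cf], cf)]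
--     return out
-- ===== Notes on version B (the rewrite author's own statement) =====
-- stated objective: alternative
-- what changed: B has no running start variable and no stepped scans: it first computes the set of cut positions (stop codon or tail) in one filter pass, then for each frame reconstructs the segments by zipping the frame's cut list with itself shifted (segment k pairs cut_{k-1}+3 with cut_k), concatenating the three frames.
import Mathlib
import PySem

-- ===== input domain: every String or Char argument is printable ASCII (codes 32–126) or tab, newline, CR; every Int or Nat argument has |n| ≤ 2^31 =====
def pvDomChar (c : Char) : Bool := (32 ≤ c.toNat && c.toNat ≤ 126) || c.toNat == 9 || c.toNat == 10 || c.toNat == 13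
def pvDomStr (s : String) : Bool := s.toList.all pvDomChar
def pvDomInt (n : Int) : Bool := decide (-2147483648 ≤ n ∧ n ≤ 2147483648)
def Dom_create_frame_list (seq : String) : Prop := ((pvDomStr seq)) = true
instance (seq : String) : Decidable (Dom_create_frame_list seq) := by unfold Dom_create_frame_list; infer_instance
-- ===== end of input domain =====

-- B replaces A's three stepped scans with running start markers by a filter-then-zip
-- formulation: compute all cut positions once, then pair consecutive cuts per frame.


-- ===== PORT A =====
-- stops = ['TAA', 'TAG']
def pvStopsA : List (List Char) := [['T','A','A'], ['T','A','G']]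

-- the loop body shared by A's three copy-pasted loops: state = (i, Frs)
def pvStepA (cs : List Char) (st : Int × List (List Int)) (j : Int) : Int × List (List Int) :=
  if (PySem.List.slice cs (some j) (some (j + 3)) ∈ pvStopsA) ∨ ((cs.length : Int) - 3 ≤ j)
  then (j + 3, st.2 ++ [[st.1, j]])
  else st

def create_frame_list (seq : String) : List (List Int) :=
  let cs := seq.toList
  let s0 := (PySem.List.pyRange 0 (cs.length : Int) 3).foldl (pvStepA cs) (0, [])
  let s1 := (PySem.List.pyRange 1 (cs.length : Int) 3).foldl (pvStepA cs) (1, s0.2)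
  let s2 := (PySem.List.pyRange 2 (cs.length : Int) 3).foldl (pvStepA cs) (2, s1.2)
  s2.2

-- ===== PORT B =====
-- B's cut predicate: position j is a cut (stop codon starts there, or j is in the tail)
def pvCutB (cs : List Char) (j : Int) : Bool :=
  decide (PySem.List.slice cs (some j) (some (j + 3)) ∈ [['T','A','A'], ['T','A','G']])
    || decide ((cs.length : Int) - 3 ≤ j)

-- segments of one frame: zip the cut list against (f :: cuts shifted by +3)
def pvSegB (cuts : List Int) (f : Int) : List (List Int) :=
  let cf := cuts.filter (fun j => PySem.Int.mod j 3 == f)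
  ((f :: cf.map (· + 3)).zip cf).map (fun p => [p.1, p.2])

def create_frame_list_alt (seq : String) : List (List Int) :=
  let cs := seq.toList
  let cuts := (PySem.List.pyRange 0 (cs.length : Int) 1).filter (pvCutB cs)
  pvSegB cuts 0 ++ pvSegB cuts 1 ++ pvSegB cuts 2

-- ===== PRECONDITION & SPEC =====
def Spec_create_frame_list (seq : String) (out : List (List Int)) : Prop := out = create_frame_list_alt seq
instance (seq : String) (out : List (List Int)) : Decidable (Spec_create_frame_list seq out) := by unfold Spec_create_frame_list; infer_instance

-- ===== CLAIM =====
def Claim_equal_create_frame_list : Prop := ∀ (seq : String), Dom_create_frame_list seq → Spec_create_frame_list seq (create_frame_list seq)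

-- ===== LEMMAS AND PROOFS =====

-- the segments determined by a start value and a cut list (proof-side characterisation)
def pvSegsFrom (i : Int) : List Int → List (List Int)
  | [] => []
  | j :: rest => [i, j] :: pvSegsFrom (j + 3) rest

theorem pvZip_eq_segsFrom (cf : List Int) (i : Int) :
    ((i :: cf.map (· + 3)).zip cf).map (fun p => [p.1, p.2]) = pvSegsFrom i cf := by
  induction cf generalizing i with
  | nil => simp [pvSegsFrom]
  | cons j rest ih => simp [pvSegsFrom, ih]

-- A's per-frame fold appends exactly the segments of the cut-filtered index list
theorem pvFoldA_segs (cs : List Char) (js : List Int) (i : Int) (L : List (List Int)) :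
    (js.foldl (pvStepA cs) (i, L)).2 = L ++ pvSegsFrom i (js.filter (pvCutB cs)) := by
  induction js generalizing i L with
  | nil => simp [pvSegsFrom]
  | cons j js ih =>
    simp only [List.foldl_cons, pvStepA, List.filter_cons]
    by_cases h : (PySem.List.slice cs (some j) (some (j + 3)) ∈ pvStopsA) ∨ ((cs.length : Int) - 3 ≤ j)
    · have hb : pvCutB cs j = true := by
        simp [pvCutB, pvStopsA] at h ⊢; tauto
      rw [if_pos h, hb, ih]
      simp [pvSegsFrom]
    · have hb : pvCutB cs j = false := by
        simp [pvCutB, pvStopsA] at h ⊢; tauto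
      rw [if_neg h, hb, ih]
      simp

-- stepped ranges as maps over Nat ranges (for f < 3)
theorem pvRange3_nat (f m : Nat) :
    PySem.List.pyRange (f : Int) (m : Int) 3
      = (List.range ((m - f + 2) / 3)).map (fun k : Nat => (f : Int) + 3 * (k : Int)) := by
  rw [PySem.List.pyRange_of_pos _ _ (by norm_num)]
  have hc : (if (f : Int) < (m : Int) then (((m : Int) - (f : Int) + 3 - 1) / 3).toNat else 0)
      = (m - f + 2) / 3 := by
    split <;> omega
  rw [hc]

-- appending one more index to a stepped range: range(f, m+1, 3) vs range(f, m, 3)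
theorem pvRange3_succ (f m : Nat) (hf : f < 3) :
    PySem.List.pyRange (f : Int) ((m : Int) + 1) 3
      = PySem.List.pyRange (f : Int) (m : Int) 3 ++ (if m % 3 = f then [(m : Int)] else []) := by
  have h1 : ((m : Int) + 1) = (((m + 1 : Nat) : Int)) := by push_cast; ring
  rw [h1, pvRange3_nat f (m + 1), pvRange3_nat f m]
  by_cases h : m % 3 = f
  · have hcount : (m + 1 - f + 2) / 3 = (m - f + 2) / 3 + 1 := by omega
    rw [hcount, List.range_succ]
    simp [h]
    omega
  · have hcount : (m + 1 - f + 2) / 3 = (m - f + 2) / 3 := by omega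
    rw [hcount]
    simp [h]

-- the frame-f positions of range(m), in order, are exactly range(f, m, 3)
theorem pvFilter_mod_range (f m : Nat) (hf : f < 3) :
    (PySem.List.pyRange 0 (m : Int) 1).filter (fun j => PySem.Int.mod j 3 == (f : Int))
      = PySem.List.pyRange (f : Int) (m : Int) 3 := by
  induction m with
  | zero =>
    have e1 : PySem.List.pyRange 0 ((0 : Nat) : Int) 1 = [] := by
      rw [PySem.List.pyRange_one_eq_nil] ; simp
    have e2 : PySem.List.pyRange (f : Int) ((0 : Nat) : Int) 3 = [] := by
      rw [PySem.List.pyRange_of_pos _ _ (by norm_num)]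
      simp
    rw [e1, e2]
    rfl
  | succ m ih =>
    rw [show (((m + 1 : Nat)) : Int) = (m : Int) + 1 from by push_cast; ring,
       PySem.List.pyRange_one_succ_right (by positivity), List.filter_append, ih,
       pvRange3_succ f m hf]
    by_cases h : m % 3 = f <;> simp [h] <;> omega

-- literal-frame instances used by the verdict
theorem pvFMR0 (m : Nat) :
    (PySem.List.pyRange 0 (m : Int) 1).filter (fun j => PySem.Int.mod j 3 == (0 : Int))
      = PySem.List.pyRange 0 (m : Int) 3 := by
  simpa using pvFilter_mod_range 0 m (by norm_num)

theorem pvFMR1 (m : Nat) :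
    (PySem.List.pyRange 0 (m : Int) 1).filter (fun j => PySem.Int.mod j 3 == (1 : Int))
      = PySem.List.pyRange 1 (m : Int) 3 := by
  simpa using pvFilter_mod_range 1 m (by norm_num)

theorem pvFMR2 (m : Nat) :
    (PySem.List.pyRange 0 (m : Int) 1).filter (fun j => PySem.Int.mod j 3 == (2 : Int))
      = PySem.List.pyRange 2 (m : Int) 3 := by
  simpa using pvFilter_mod_range 2 m (by norm_num)

-- ===== VERDICT =====
theorem create_frame_list_spec : Claim_equal_create_frame_list := by
  intro seq _
  unfold Spec_create_frame_list
  simp only [create_frame_list, create_frame_list_alt, pvSegB]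
  set cs := seq.toList with hcs
  rw [pvZip_eq_segsFrom, pvZip_eq_segsFrom, pvZip_eq_segsFrom,
      List.filter_comm (fun j => PySem.Int.mod j 3 == (0 : Int)) (pvCutB cs),
      List.filter_comm (fun j => PySem.Int.mod j 3 == (1 : Int)) (pvCutB cs),
      List.filter_comm (fun j => PySem.Int.mod j 3 == (2 : Int)) (pvCutB cs),
      pvFMR0, pvFMR1, pvFMR2,
      pvFoldA_segs, pvFoldA_segs, pvFoldA_segs]
  simp
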